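-- pv_equiv track=rewrite | github.com/jsantiagoProbelte/baasweb | trialapp/import_pdf_trial.py | findRowPosition
-- ===== SOURCE A (Python) =====
-- def findRowPosition(columnText, key):
--     index = 0
--     rows = columnText.split('\r')
--     for row in rows:
--         if key in row:
--             return index
--         index += 1
--     return None
-- ===== SOURCE B (Python) =====
-- def findRowPosition(columnText, key):
--     # A key containing '\r' can never occur inside a single row.
--     if '\r' in key:
--         return None
--     pos = columnText.find(key)
--     if pos == -1:
--         return None
--     return columnText[:pos].count('\r')
-- ===== Notes on version B (the rewrite author's own statement) =====
-- stated objective: simpler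
-- what changed: B replaces the split-on-'\r' row loop with an index accumulator by one global find of the key followed by counting the '\r' delimiters before that position.
import Mathlib
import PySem

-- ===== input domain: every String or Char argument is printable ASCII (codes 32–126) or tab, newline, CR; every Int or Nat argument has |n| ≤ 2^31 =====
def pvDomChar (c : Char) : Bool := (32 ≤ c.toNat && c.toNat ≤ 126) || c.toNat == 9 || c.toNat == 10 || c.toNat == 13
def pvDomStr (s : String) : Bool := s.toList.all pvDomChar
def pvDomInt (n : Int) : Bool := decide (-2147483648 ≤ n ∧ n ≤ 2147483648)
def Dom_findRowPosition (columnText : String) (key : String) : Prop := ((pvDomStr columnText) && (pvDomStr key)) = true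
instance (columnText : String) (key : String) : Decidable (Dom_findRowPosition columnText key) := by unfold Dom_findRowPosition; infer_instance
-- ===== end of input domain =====

-- B replaces A's split-on-'\r' row loop (index accumulator) by one global find of the key
-- plus a count of the '\r' delimiters before that position; objective: simpler.

-- ===== PORT A =====
-- the 'for row in rows' loop with the running index
def goA (key : String) : List String → Int → Option Int
  | [], _ => none
  | r :: rs, i => if PySem.Str.isIn key r then some i else goA key rs (i + 1)

def findRowPosition (columnText : String) (key : String) : Option Int :=
  match PySem.Str.split? columnText "\r" with
  | some rows => goA key rows 0
  | none => none   -- unreachable: the separator "\r" is non-empty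

-- ===== PORT B =====
def findRowPosition_alt (columnText : String) (key : String) : Option Int :=
  if PySem.Str.isIn "\r" key then none
  else
    let pos := PySem.Str.find columnText key
    if pos = -1 then none
    else some ((PySem.Str.count (PySem.Str.slice columnText none (some pos)) "\r" : Int))

-- ===== PRECONDITION & SPEC =====
def Spec_findRowPosition (columnText : String) (key : String) (out : Option Int) : Prop := out = findRowPosition_alt columnText key
instance (columnText : String) (key : String) (out : Option Int) : Decidable (Spec_findRowPosition columnText key out) := by unfold Spec_findRowPosition; infer_instance

-- ===== CLAIM (what is proved, stated in full; the proofs are below) =====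
def Claim_equal_findRowPosition : Prop := ∀ (columnText : String) (key : String), Dom_findRowPosition columnText key → Spec_findRowPosition columnText key (findRowPosition columnText key)

-- ===== LEMMAS AND PROOFS =====

-- a singleton prefix pins the head
theorem single_prefix_head {c d : Char} {t : List Char}
    (h : [c].isPrefixOf (d :: t) = true) : c = d := by
  rw [List.isPrefixOf_iff_prefix] at h
  rcases h with ⟨w, hw⟩
  simp only [List.cons_append, List.nil_append, List.cons.injEq] at hw
  exact hw.1

-- goA on the Chars side
def goAC (k : List Char) : List (List Char) → Int → Option Int
  | [], _ => none
  | r :: rs, i => if PySem.Chars.isIn k r then some i else goAC k rs (i + 1)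

-- what B computes, on the Chars side
def bval (c : Char) (k s : List Char) : Option Int :=
  if PySem.Chars.find s k = -1 then none
  else some (((s.take (PySem.Chars.find s k).toNat).count c : Int))

theorem goA_eq_goAC (key : String) (rows : List String) (i : Int) :
    goA key rows i = goAC key.toList (rows.map String.toList) i := by
  induction rows generalizing i with
  | nil => rfl
  | cons r rs ih => simp [goA, goAC, PySem.Str.isIn_eq, ih]

-- find.go with an arbitrary offset
theorem findgo_shift (k s : List Char) (n : Nat) :
    PySem.Chars.find.go k s n =
      if PySem.Chars.find.go k s 0 = -1 then -1 else (n : Int) + PySem.Chars.find.go k s 0 := by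
  induction s generalizing n with
  | nil =>
    simp only [PySem.Chars.find.go]
    split_ifs <;> omega
  | cons d t ih =>
    have h1 := ih 1
    have hn := ih (n + 1)
    by_cases hp : k.isPrefixOf (d :: t)
    · rw [show PySem.Chars.find.go k (d :: t) n = (n : Int) from by
          simp [PySem.Chars.find.go, hp],
        show PySem.Chars.find.go k (d :: t) 0 = (0 : Int) from by
          simp [PySem.Chars.find.go, hp]]
      norm_num
    · simp only [PySem.Chars.find.go, hp, Bool.false_eq_true, if_false, Nat.zero_add]
      rw [hn, h1]
      have hb := PySem.Chars.neg_one_le_find (s := t) (sub := k)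
      simp only [PySem.Chars.find] at hb
      split_ifs <;> push_cast <;> omega

-- unfolding rule for find on a cons
theorem find_cons (k : List Char) (d : Char) (t : List Char) :
    PySem.Chars.find (d :: t) k =
      if k.isPrefixOf (d :: t) then 0
      else if PySem.Chars.find t k = -1 then -1 else 1 + PySem.Chars.find t k := by
  by_cases hp : k.isPrefixOf (d :: t)
  · simp [PySem.Chars.find, PySem.Chars.find.go, hp]
  · simp only [PySem.Chars.find, PySem.Chars.find.go, hp, Bool.false_eq_true, if_false,
      Nat.zero_add]
    rw [findgo_shift k t 1]
    split_ifs <;> omega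

-- a prefix of r ++ u that is no longer than r is a prefix of r
theorem prefix_of_append_short {k r u : List Char} (h : k <+: r ++ u) (hl : k.length ≤ r.length) :
    k <+: r := by
  have hk := List.prefix_iff_eq_take.mp h
  rw [List.take_append_of_le_length hl] at hk
  rw [hk]
  exact List.take_prefix _ _

-- if the key occurs in r, appending anything does not change where find first hits
theorem find_append_of_infix (k r u : List Char) (h : k <:+: r) :
    PySem.Chars.find (r ++ u) k = PySem.Chars.find r k := by
  induction r with
  | nil =>
    have : k = [] := by simpa using h.length_le.antisymm (Nat.zero_le _)
    simp [this, PySem.Chars.find_nil]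
  | cons d r' ih =>
    by_cases hp : k.isPrefixOf (d :: r')
    · have hp2 : k.isPrefixOf ((d :: r') ++ u) = true := by
        rw [List.isPrefixOf_iff_prefix] at *
        exact hp.trans (List.prefix_append _ _)
      rw [show (d :: r') ++ u = d :: (r' ++ u) from rfl] at hp2 ⊢
      rw [find_cons, find_cons, hp2, if_pos hp]
      simp
    · have hp2 : ¬ k.isPrefixOf (d :: (r' ++ u)) := by
        intro hpre
        rw [List.isPrefixOf_iff_prefix] at hpre hp
        exact hp (prefix_of_append_short (r := d :: r') hpre h.length_le)
      have hinf' : k <:+: r' := by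
        rcases List.infix_cons_iff.mp h with h1 | h1
        · exact absurd h1 (by rw [List.isPrefixOf_iff_prefix] at hp; exact hp)
        · exact h1
      have hne : PySem.Chars.find r' k ≠ -1 :=
        (PySem.Chars.find_ne_neg_one_iff r' k).mpr hinf'
      have hne2 : PySem.Chars.find (r' ++ u) k ≠ -1 := by rw [ih hinf']; exact hne
      rw [show (d :: r') ++ u = d :: (r' ++ u) from rfl, find_cons, find_cons]
      simp only [hp2, if_false, hp, if_false, ih hinf', if_neg hne]

-- if the key misses r and contains no c, find skips past "r ++ c ::" entirely
theorem find_skip (c : Char) (k : List Char) (hck : c ∉ k) :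
    ∀ (r t : List Char), c ∉ r → ¬ k <:+: r →
    PySem.Chars.find (r ++ c :: t) k =
      if PySem.Chars.find t k = -1 then -1 else (r.length : Int) + 1 + PySem.Chars.find t k := by
  intro r
  induction r with
  | nil =>
    intro t _ hni
    have hkne : k ≠ [] := by intro hk; exact hni (hk ▸ List.nil_infix)
    have hp : ¬ k.isPrefixOf (c :: t) = true := by
      intro hp
      rw [List.isPrefixOf_iff_prefix] at hp
      cases k with
      | nil => exact hkne rfl
      | cons a k' =>
        rcases hp with ⟨w, hw⟩
        simp only [List.cons_append, List.cons.injEq] at hw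
        exact hck (hw.1 ▸ List.mem_cons_self)
    rw [List.nil_append, find_cons, if_neg hp]
    simp only [List.length_nil, Nat.cast_zero]
    split_ifs <;> omega
  | cons d r' ih =>
    intro t hcr hni
    have hcr' : c ∉ r' := fun h => hcr (List.mem_cons_of_mem _ h)
    have hni' : ¬ k <:+: r' := fun h => hni (List.infix_cons_iff.mpr (Or.inr h))
    have hp : ¬ k.isPrefixOf (d :: (r' ++ c :: t)) := by
      intro hp
      rw [List.isPrefixOf_iff_prefix] at hp
      by_cases hlen : k.length ≤ (d :: r').length
      · exact hni ((prefix_of_append_short (u := c :: t)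
          (by simpa using hp) hlen).isInfix)
      · -- k is long enough to contain the separator c
        have hk := List.prefix_iff_eq_take.mp hp
        have hlen2 : (d :: r').length + 1 ≤ k.length := by omega
        have : c ∈ k := by
          rw [hk]
          have h3 : ((d :: r') ++ c :: t).take k.length =
              (d :: r') ++ (c :: t).take (k.length - (d :: r').length) := by
            conv_lhs => rw [show k.length = (d :: r').length + (k.length - (d :: r').length) by
              omega]
            rw [List.take_length_add_append]
          rw [show d :: (r' ++ c :: t) = (d :: r') ++ c :: t from rfl, h3]
          have : 1 ≤ k.length - (d :: r').length := by omega
          rcases Nat.exists_eq_add_of_le this with ⟨m, hm⟩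
          rw [hm, Nat.add_comm, List.take_succ_cons]
          simp
        exact hck this
    rw [show (d :: r') ++ c :: t = d :: (r' ++ c :: t) from rfl, find_cons, if_neg hp,
      ih t hcr' hni']
    have hge := PySem.Chars.neg_one_le_find (s := t) (sub := k)
    simp only [List.length_cons]
    split_ifs <;> push_cast <;> omega

-- counting a single character
theorem countgo_single (c : Char) :
    ∀ (l : List Char) (acc fuel : Nat), l.length ≤ fuel →
      PySem.Chars.count.go [c] fuel l acc = acc + l.count c := by
  intro l
  induction l with
  | nil => intro acc fuel _; cases fuel <;> simp [PySem.Chars.count.go]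
  | cons d t ih =>
    intro acc fuel hf
    match fuel, hf with
    | (f + 1), hf =>
      have hf' : t.length ≤ f := by simpa using hf
      by_cases hd : d = c
      · subst hd
        have hpre : [d].isPrefixOf (d :: t) = true := by
          rw [List.isPrefixOf_iff_prefix]; exact ⟨t, rfl⟩
        simp only [PySem.Chars.count.go, hpre, if_true, List.length_cons, List.length_nil,
          List.drop_succ_cons, List.drop_zero, Nat.zero_add]
        rw [ih (acc + 1) f hf']
        simp [List.count_cons]
        omega
      · have hpre : ¬ [c].isPrefixOf (d :: t) = true := fun h =>
          hd (single_prefix_head h).symm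
        simp only [PySem.Chars.count.go, hpre, Bool.false_eq_true, if_false]
        rw [ih acc f hf']
        simp [List.count_cons, hd]

theorem count_single (c : Char) (s : List Char) :
    PySem.Chars.count s [c] = s.count c := by
  have h := countgo_single c s 0 s.length le_rfl
  simp only [PySem.Chars.count, List.isEmpty_cons, Bool.false_eq_true, if_false, h,
    Nat.zero_add]

-- splitOn.go on a chunk with no separator
theorem splitgo_nosep (c : Char) :
    ∀ (l : List Char) (cur : List Char) (acc : List (List Char)) (fuel : Nat),
      c ∉ l → l.length < fuel →
      PySem.Chars.splitOn.go [c] fuel l cur acc = ((cur.reverse ++ l) :: acc).reverse := by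
  intro l
  induction l with
  | nil => intro cur acc fuel _ _; cases fuel <;> simp [PySem.Chars.splitOn.go]
  | cons d t ih =>
    intro cur acc fuel hc hf
    match fuel, hf with
    | (f + 1), hf =>
      have hd : d ≠ c := fun h => hc (h ▸ List.mem_cons_self)
      have hpre : ¬ [c].isPrefixOf (d :: t) = true := fun h =>
        hd (single_prefix_head h).symm
      simp only [PySem.Chars.splitOn.go, hpre, Bool.false_eq_true, if_false]
      rw [ih (d :: cur) acc f (fun h => hc (List.mem_cons_of_mem _ h)) (by simpa using hf)]
      simp

-- splitOn.go consumes a separator-free chunk followed by the separator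
theorem splitgo_chunk (c : Char) :
    ∀ (r t cur : List Char) (acc : List (List Char)) (f : Nat), c ∉ r →
      PySem.Chars.splitOn.go [c] (f + r.length + 1) (r ++ c :: t) cur acc =
        PySem.Chars.splitOn.go [c] f t [] ((cur.reverse ++ r) :: acc) := by
  intro r
  induction r with
  | nil =>
    intro t cur acc f _
    have hpre : [c].isPrefixOf (c :: t) := by
      rw [List.isPrefixOf_iff_prefix]; exact ⟨t, rfl⟩
    simp [PySem.Chars.splitOn.go, hpre]
  | cons d r' ih =>
    intro t cur acc f hc
    have hd : d ≠ c := fun h => hc (h ▸ List.mem_cons_self)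
    have hpre : ¬ [c].isPrefixOf (d :: (r' ++ c :: t)) = true := fun h =>
      hd (single_prefix_head h).symm
    have harith : f + (d :: r').length + 1 = (f + r'.length + 1) + 1 := by simp; omega
    rw [harith]
    show PySem.Chars.splitOn.go [c] ((f + r'.length + 1) + 1) (d :: (r' ++ c :: t)) cur acc = _
    simp only [PySem.Chars.splitOn.go, hpre, Bool.false_eq_true, if_false]
    rw [ih t (d :: cur) acc f (fun h => hc (List.mem_cons_of_mem _ h))]
    simp

theorem splitOn_nosep (c : Char) (s : List Char) (hc : c ∉ s) :
    PySem.Chars.splitOn s [c] = [s] := by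
  unfold PySem.Chars.splitOn
  rw [splitgo_nosep c s [] [] (s.length + 1) hc (by omega)]
  simp

-- splitOn.go with the standard fuel and an accumulator
theorem splitgo_acc (c : Char) :
    ∀ (n : Nat) (l : List Char), l.length ≤ n → ∀ (acc : List (List Char)),
      PySem.Chars.splitOn.go [c] (l.length + 1) l [] acc =
        acc.reverse ++ PySem.Chars.splitOn l [c] := by
  intro n
  induction n with
  | zero =>
    intro l hl acc
    have : l = [] := List.length_eq_zero_iff.mp (Nat.le_zero.mp hl)
    subst this
    simp [PySem.Chars.splitOn, PySem.Chars.splitOn.go]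
  | succ m ihm =>
    intro l hl acc
    rcases hrest : l.dropWhile (· ≠ c) with _ | ⟨e, t⟩
    · -- no separator in l
      have hc : c ∉ l := by
        intro hm
        have h2 := List.takeWhile_append_dropWhile (p := (· ≠ c)) (l := l)
        rw [hrest] at h2; simp at h2
        exact h2 c hm rfl
      rw [splitgo_nosep c l [] acc (l.length + 1) hc (by omega), splitOn_nosep c l hc]
      simp
    · -- l = r ++ c :: t with c ∉ r
      set r := l.takeWhile (· ≠ c) with hr
      have hec : e = c := by
        have h2 := List.head_dropWhile_not (p := fun x => x ≠ c) (l := l)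
        rw [hrest] at h2; simpa using h2
      subst hec
      have hl2 : l = r ++ e :: t := by
        rw [hr, ← hrest]; exact (List.takeWhile_append_dropWhile).symm
      have hcr : e ∉ r := by
        intro hm
        have := List.mem_takeWhile_imp (hr ▸ hm)
        simp at this
      have hlen : l.length = r.length + 1 + t.length := by rw [hl2]; simp; omega
      have htlen : t.length ≤ m := by omega
      rw [hl2, show (r ++ e :: t).length + 1 = (t.length + 1) + r.length + 1 by simp; omega,
        splitgo_chunk e r t [] acc (t.length + 1) hcr]
      simp only [List.reverse_nil, List.nil_append]
      rw [ihm t htlen (r :: acc)]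
      have : PySem.Chars.splitOn (r ++ e :: t) [e] = r :: PySem.Chars.splitOn t [e] := by
        unfold PySem.Chars.splitOn
        rw [show (r ++ e :: t).length + 1 = (t.length + 1) + r.length + 1 by simp; omega,
          splitgo_chunk e r t [] [] (t.length + 1) hcr]
        have := ihm t htlen [r]
        unfold PySem.Chars.splitOn at this
        simp only [List.reverse_nil, List.nil_append]
        rw [this]
        simp
      rw [this]
      simp

theorem splitOn_chunk (c : Char) (r t : List Char) (hcr : c ∉ r) :
    PySem.Chars.splitOn (r ++ c :: t) [c] = r :: PySem.Chars.splitOn t [c] := by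
  unfold PySem.Chars.splitOn
  rw [show (r ++ c :: t).length + 1 = (t.length + 1) + r.length + 1 by simp; omega,
    splitgo_chunk c r t [] [] (t.length + 1) hcr]
  have := splitgo_acc c t.length t le_rfl [r]
  unfold PySem.Chars.splitOn at this
  simp only [List.reverse_nil, List.nil_append]
  rw [this]
  simp

-- every piece of splitOn s [c] is c-free
theorem splitOn_free (c : Char) :
    ∀ (n : Nat) (s : List Char), s.length ≤ n → ∀ x ∈ PySem.Chars.splitOn s [c], c ∉ x := by
  intro n
  induction n with
  | zero =>
    intro s hs x hx
    have : s = [] := List.length_eq_zero_iff.mp (Nat.le_zero.mp hs)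
    subst this
    rw [splitOn_nosep c [] (by simp)] at hx
    simp at hx; subst hx; simp
  | succ m ihm =>
    intro s hs x hx
    rcases hrest : s.dropWhile (· ≠ c) with _ | ⟨e, t⟩
    · have hc : c ∉ s := by
        intro hm
        have h2 := List.takeWhile_append_dropWhile (p := (· ≠ c)) (l := s)
        rw [hrest] at h2; simp at h2
        exact h2 c hm rfl
      rw [splitOn_nosep c s hc] at hx
      simp at hx; subst hx; exact hc
    · set r := s.takeWhile (· ≠ c) with hr
      have hec : e = c := by
        have h2 := List.head_dropWhile_not (p := fun x => x ≠ c) (l := s)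
        rw [hrest] at h2; simpa using h2
      subst hec
      have hs2 : s = r ++ e :: t := by
        rw [hr, ← hrest]; exact (List.takeWhile_append_dropWhile).symm
      have hcr : e ∉ r := by
        intro hm
        have := List.mem_takeWhile_imp (hr ▸ hm)
        simp at this
      rw [hs2, splitOn_chunk e r t hcr] at hx
      rcases List.mem_cons.mp hx with hx | hx
      · subst hx; exact hcr
      · exact ihm t (by rw [hs2] at hs; simp at hs; omega) x hx

-- A's loop returns none when the key contains the separator
theorem goAC_none (c : Char) (k : List Char) (hck : c ∈ k) :
    ∀ (rows : List (List Char)) (i : Int), (∀ x ∈ rows, c ∉ x) → goAC k rows i = none := by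
  intro rows
  induction rows with
  | nil => intro i _; rfl
  | cons r rs ih =>
    intro i hfree
    have : PySem.Chars.isIn k r = false := by
      rw [PySem.Chars.isIn_eq_false_iff]
      intro hinf
      exact hfree r List.mem_cons_self (hinf.subset hck)
    simp [goAC, this]
    exact ih (i + 1) (fun x hx => hfree x (List.mem_cons_of_mem _ hx))

-- the main invariant: A's row loop equals B's find-and-count, shifted by the start index
theorem main_loop (c : Char) (k : List Char) (hck : c ∉ k) :
    ∀ (n : Nat) (s : List Char), s.length ≤ n → ∀ (i : Int),
      goAC k (PySem.Chars.splitOn s [c]) i = Option.map (· + i) (bval c k s) := by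
  intro n
  induction n with
  | zero =>
    intro s hs i
    have : s = [] := List.length_eq_zero_iff.mp (Nat.le_zero.mp hs)
    subst this
    rw [splitOn_nosep c [] (by simp)]
    by_cases hin : PySem.Chars.isIn k []
    · have hne : PySem.Chars.find ([] : List Char) k ≠ -1 := by
        simpa [PySem.Chars.isIn] using hin
      have h0 : PySem.Chars.find ([] : List Char) k = 0 := by
        have h1 := PySem.Chars.neg_one_le_find (s := ([] : List Char)) (sub := k)
        have h2 := PySem.Chars.find_le_length ([] : List Char) k
        simp at h2; omega
      simp [goAC, hin, bval, h0]
    · have heq : PySem.Chars.find ([] : List Char) k = -1 := by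
        by_contra h
        exact hin (by simpa [PySem.Chars.isIn] using h)
      simp [goAC, hin, bval, heq]
  | succ m ihm =>
    intro s hs i
    rcases hrest : s.dropWhile (· ≠ c) with _ | ⟨e, t⟩
    · -- c does not occur in s: a single row
      have hc : c ∉ s := by
        intro hm
        have h2 := List.takeWhile_append_dropWhile (p := (· ≠ c)) (l := s)
        rw [hrest] at h2; simp at h2
        exact h2 c hm rfl
      rw [splitOn_nosep c s hc]
      by_cases hin : PySem.Chars.isIn k s
      · have hne : PySem.Chars.find s k ≠ -1 := by
          simpa [PySem.Chars.isIn] using hin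
        have hcnt : (s.take (PySem.Chars.find s k).toNat).count c = 0 := by
          rw [List.count_eq_zero]
          exact fun h => hc (List.take_subset _ _ h)
        simp [goAC, hin, bval, hne, hcnt]
      · have heq : PySem.Chars.find s k = -1 := by
          by_contra h
          exact hin (by simpa [PySem.Chars.isIn] using h)
        simp [goAC, hin, bval, heq]
    · -- s = r ++ c :: t with c ∉ r
      set r := s.takeWhile (· ≠ c) with hr
      have hec : e = c := by
        have h2 := List.head_dropWhile_not (p := fun x => x ≠ c) (l := s)
        rw [hrest] at h2; simpa using h2
      subst hec
      have hs2 : s = r ++ e :: t := by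
        rw [hr, ← hrest]; exact (List.takeWhile_append_dropWhile).symm
      have hcr : e ∉ r := by
        intro hm
        have := List.mem_takeWhile_imp (hr ▸ hm)
        simp at this
      have htlen : t.length ≤ m := by
        rw [hs2] at hs; simp at hs; omega
      rw [hs2, splitOn_chunk e r t hcr]
      by_cases hin : PySem.Chars.isIn k r
      · -- key found in the first row
        have hinf : k <:+: r := (PySem.Chars.isIn_iff_infix k r).mp hin
        have hfind : PySem.Chars.find (r ++ e :: t) k = PySem.Chars.find r k :=
          find_append_of_infix k r (e :: t) hinf
        have hge : (0 : Int) ≤ PySem.Chars.find r k :=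
          (PySem.Chars.find_nonneg_iff r k).mpr hinf
        have hle : PySem.Chars.find r k ≤ r.length := PySem.Chars.find_le_length r k
        have hne : PySem.Chars.find (r ++ e :: t) k ≠ -1 := by rw [hfind]; omega
        have htake : (r ++ e :: t).take (PySem.Chars.find r k).toNat =
            r.take (PySem.Chars.find r k).toNat :=
          List.take_append_of_le_length (by omega)
        have hcnt : ((r ++ e :: t).take (PySem.Chars.find (r ++ e :: t) k).toNat).count e = 0 := by
          rw [hfind, htake, List.count_eq_zero]
          exact fun h => hcr (List.take_subset _ _ h)
        simp [goAC, hin, bval, hne, hcnt]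
      · -- key not in the first row: recurse on t
        have hni : ¬ k <:+: r := fun h => hin ((PySem.Chars.isIn_iff_infix k r).mpr h)
        have hfind := find_skip e k hck r t hcr hni
        rw [show goAC k (r :: PySem.Chars.splitOn t [e]) i =
            goAC k (PySem.Chars.splitOn t [e]) (i + 1) by simp [goAC, hin]]
        rw [ihm t htlen (i + 1)]
        by_cases htf : PySem.Chars.find t k = -1
        · have : PySem.Chars.find (r ++ e :: t) k = -1 := by rw [hfind]; simp [htf]
          simp [bval, htf, this]
        · have hge : (0 : Int) ≤ PySem.Chars.find t k := by
            have := PySem.Chars.neg_one_le_find (s := t) (sub := k)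
            omega
          have hfv : PySem.Chars.find (r ++ e :: t) k =
              (r.length : Int) + 1 + PySem.Chars.find t k := by rw [hfind]; simp [htf]
          have hne : PySem.Chars.find (r ++ e :: t) k ≠ -1 := by omega
          have htoNat : (PySem.Chars.find (r ++ e :: t) k).toNat =
              r.length + (1 + (PySem.Chars.find t k).toNat) := by omega
          have htake : (r ++ e :: t).take (r.length + (1 + (PySem.Chars.find t k).toNat)) =
              r ++ e :: t.take (PySem.Chars.find t k).toNat := by
            rw [List.take_length_add_append, Nat.add_comm, List.take_succ_cons]
          have hcnt : ((r ++ e :: t).take (PySem.Chars.find (r ++ e :: t) k).toNat).count e =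
              r.count e + (1 + (t.take (PySem.Chars.find t k).toNat).count e) := by
            rw [htoNat, htake]
            simp [List.count_append, List.count_cons]
            omega
          have hr0 : r.count e = 0 := List.count_eq_zero.mpr hcr
          simp only [bval, htf, if_false, hne, if_false, Option.map_some, hcnt, hr0]
          congr 1
          push_cast
          omega

-- B's Str-level body equals bval on the Chars side
theorem alt_eq_bval (columnText key : String) (hck : ('\r' : Char) ∉ key.toList) :
    findRowPosition_alt columnText key =
      bval '\r' key.toList columnText.toList := by
  have hnotin : PySem.Str.isIn "\r" key = false := by
    rw [PySem.Str.isIn_eq]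
    rw [PySem.Chars.isIn_eq_false_iff]
    intro h
    have hmem : ('\r' : Char) ∈ ("\r" : String).toList := by decide
    exact hck (h.subset hmem)
  unfold findRowPosition_alt
  rw [hnotin]
  simp only [Bool.false_eq_true, if_false]
  by_cases hf : PySem.Str.find columnText key = -1
  · have : PySem.Chars.find columnText.toList key.toList = -1 := by
      rw [← PySem.Str.find_eq]; exact hf
    simp [hf, bval, this]
  · have hcf : PySem.Chars.find columnText.toList key.toList ≠ -1 := by
      rw [← PySem.Str.find_eq]; exact hf
    have hge : (0 : Int) ≤ PySem.Str.find columnText key := by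
      rw [PySem.Str.find_eq]
      have := PySem.Chars.neg_one_le_find (s := columnText.toList) (sub := key.toList)
      rw [PySem.Str.find_eq] at hf
      omega
    simp only [hf, if_false, bval, hcf, if_false]
    congr 1
    rw [PySem.Str.count_eq, PySem.Str.toList_slice]
    rw [PySem.Chars.slice_eq_listSlice, PySem.List.slice_to _ hge]
    rw [show ("\r" : String).toList = ['\r'] from rfl, count_single]
    rw [PySem.Str.find_eq]

-- ===== VERDICT (by name: the statement is the Claim_ definition above) =====
theorem findRowPosition_spec : Claim_equal_findRowPosition := by
  intro columnText key _
  unfold Spec_findRowPosition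
  -- unfold A: the split always succeeds since "\r" is non-empty
  have hsplit := PySem.Str.split?_map columnText "\r"
  have hcs : PySem.Chars.split? columnText.toList ("\r" : String).toList =
      some (PySem.Chars.splitOn columnText.toList ['\r']) := by
    simp [PySem.Chars.split?]
  rw [hcs] at hsplit
  rcases hopt : PySem.Str.split? columnText "\r" with _ | rows
  · rw [hopt] at hsplit; simp at hsplit
  · rw [hopt] at hsplit
    simp only [Option.map_some, Option.some.injEq] at hsplit
    unfold findRowPosition
    rw [hopt]
    show goA key rows 0 = findRowPosition_alt columnText key
    rw [goA_eq_goAC, hsplit]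
    by_cases hck : ('\r' : Char) ∈ key.toList
    · -- key contains the separator: both sides are none
      have hA := goAC_none '\r' key.toList hck
        (PySem.Chars.splitOn columnText.toList ['\r']) 0
        (splitOn_free '\r' columnText.toList.length columnText.toList le_rfl)
      rw [hA]
      have hbin : PySem.Chars.isIn ['\r'] key.toList = true := by
        rw [PySem.Chars.isIn_iff_infix]
        exact (List.singleton_infix_iff '\r' key.toList).mpr hck
      simp [findRowPosition_alt, hbin]
    · rw [main_loop '\r' key.toList hck columnText.toList.length columnText.toList le_rfl 0,
        alt_eq_bval columnText key hck]
      rcases bval '\r' key.toList columnText.toList with _ | v <;> simp
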